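-- pv_equiv track=rewrite | github.com/ivoheck/ML-Projekt-Tischtennis | model/test_model.py | merge_indices
-- ===== SOURCE A (Python) =====
-- def merge_indices(indices, threshold):
--     if not indices:
--         return []
--
--     merged_indices = []
--     current_group = [indices[0]]
--
--     for i in range(1, len(indices)):
--         if indices[i] - current_group[-1] <= threshold:
--             current_group.append(indices[i])
--         else:
--             merged_indices.append(sum(current_group) // len(current_group))
--             current_group = [indices[i]]
--
--     merged_indices.append(sum(current_group) // len(current_group))
--     return merged_indices
-- ===== SOURCE B (Python) =====
-- def merge_indices(indices, threshold):
--     if not indices: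
--         return []
--     n = len(indices)
--     # cut positions: 0, every position whose gap to its predecessor exceeds the threshold, n
--     cuts = [0] + [i for i, (a, b) in enumerate(zip(indices, indices[1:]), 1) if b - a > threshold] + [n]
--     # each adjacent cut pair delimits one segment; reduce it to its floor average
--     return [sum(indices[a:b]) // (b - a) for a, b in zip(cuts, cuts[1:])]
-- ===== Notes on version B (the rewrite author's own statement) =====
-- stated objective: alternative
-- what changed: Replaces A's single-pass accumulation of a current-group buffer with an index-arithmetic scheme: compute the list of cut positions from adjacent pairs, then map floor-average over the slices delimited by consecutive cut pairs, with no grouping loop or group buffer at all.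
import Mathlib
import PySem

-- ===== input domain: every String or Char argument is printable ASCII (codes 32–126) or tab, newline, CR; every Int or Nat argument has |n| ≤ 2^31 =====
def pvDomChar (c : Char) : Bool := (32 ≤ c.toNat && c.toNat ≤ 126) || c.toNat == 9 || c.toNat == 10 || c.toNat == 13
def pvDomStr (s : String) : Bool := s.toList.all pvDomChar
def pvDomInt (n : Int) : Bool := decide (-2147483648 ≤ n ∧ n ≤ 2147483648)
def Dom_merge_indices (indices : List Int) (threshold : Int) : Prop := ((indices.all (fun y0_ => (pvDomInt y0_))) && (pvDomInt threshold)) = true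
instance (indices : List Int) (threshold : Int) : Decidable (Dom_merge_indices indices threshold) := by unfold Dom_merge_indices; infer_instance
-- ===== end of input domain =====

-- B replaces A's single-pass current-group accumulation by index arithmetic: it
-- computes the cut positions from adjacent pairs and maps floor-average over the
-- slices delimited by consecutive cuts; objective: alternative (same cost).

-- ===== PORT A =====
def merge_indices (indices : List Int) (threshold : Int) : List Int :=
  if indices = [] then []
  else
    -- state: (merged_indices, current_group); for i in range(1, len(indices))
    let st := (PySem.List.pyRange 1 (indices.length : Int) 1).foldl
      (fun (st : List Int × List Int) i =>
        -- indices[i] (always in range) and current_group[-1] (group never empty): pyGetD is exact here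
        let x := PySem.List.pyGetD indices i 0
        if x - PySem.List.pyGetD st.2 (-1) 0 ≤ threshold then (st.1, st.2 ++ [x])
        else (st.1 ++ [PySem.Int.floordiv st.2.sum (st.2.length : Int)], [x]))
      ([], [PySem.List.pyGetD indices 0 0])
    st.1 ++ [PySem.Int.floordiv st.2.sum (st.2.length : Int)]

-- ===== PORT B =====
def merge_indices_alt (indices : List Int) (threshold : Int) : List Int :=
  if indices = [] then []
  else
    let n : Int := indices.length
    -- cut positions: 0, every position whose gap to its predecessor exceeds the threshold, n
    let cuts : List Int := [0] ++
      ((PySem.List.enumerate (indices.zip (PySem.List.slice indices (some 1) none)) 1).filter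
        (fun ip => decide (ip.2.2 - ip.2.1 > threshold))).map (·.1) ++ [n]
    -- each adjacent cut pair delimits one segment; reduce it to its floor average
    (cuts.zip (PySem.List.slice cuts (some 1) none)).map (fun ab =>
      let seg := PySem.List.slice indices (some ab.1) (some ab.2)
      PySem.Int.floordiv seg.sum (seg.length : Int))

-- ===== PRECONDITION & SPEC =====
def Spec_merge_indices (indices : List Int) (threshold : Int) (out : List Int) : Prop := out = merge_indices_alt indices threshold
instance (indices : List Int) (threshold : Int) (out : List Int) : Decidable (Spec_merge_indices indices threshold out) := by unfold Spec_merge_indices; infer_instance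

-- ===== CLAIM (what is proved, stated in full; the proofs are below) =====
def Claim_equal_merge_indices : Prop := ∀ (indices : List Int) (threshold : Int), Dom_merge_indices indices threshold → Spec_merge_indices indices threshold (merge_indices indices threshold)

-- ===== LEMMAS AND PROOFS =====

-- floor average of a segment
def pvAvg (s : List Int) : Int := PySem.Int.floordiv s.sum (s.length : Int)

-- A's loop body, with the element already fetched
def pvStepA (threshold : Int) (st : List Int × List Int) (x : Int) : List Int × List Int :=
  if x - PySem.List.pyGetD st.2 (-1) 0 ≤ threshold then (st.1, st.2 ++ [x])
  else (st.1 ++ [pvAvg st.2], [x])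

-- absolute break positions of the pair chain (p, ys) starting at index k
def pvBrk (threshold : Int) (k p : Int) : List Int → List Int
  | [] => []
  | y :: ys => if y - p > threshold then k :: pvBrk threshold (k+1) y ys
               else pvBrk threshold (k+1) y ys

-- B's final map over consecutive cut pairs
def pvSegAvg (l : List Int) (cuts : List Int) : List Int :=
  (cuts.zip cuts.tail).map (fun ab => pvAvg (PySem.List.slice l (some ab.1) (some ab.2)))

theorem pvBrk_eq_enumFilter (threshold : Int) (ys : List Int) : ∀ (p k : Int),
    ((PySem.List.enumerate ((p :: ys).zip ys) k).filter
      (fun ip => decide (ip.2.2 - ip.2.1 > threshold))).map (·.1)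
    = pvBrk threshold k p ys := by
  induction ys with
  | nil => intro p k; simp [pvBrk]
  | cons y ys ih =>
    intro p k
    rw [show (p :: y :: ys).zip (y :: ys) = (p, y) :: ((y :: ys).zip ys) from rfl,
        PySem.List.enumerate_cons]
    by_cases h : y - p > threshold
    · simp [h, pvBrk, ih]
    · simp [h, pvBrk, ih]

theorem pvSegAvg_cons (l : List Int) (a b : Int) (rest : List Int) :
    pvSegAvg l (a :: b :: rest) = pvAvg (PySem.List.slice l (some a) (some b)) :: pvSegAvg l (b :: rest) := by
  simp [pvSegAvg]

-- main invariant: flushing A's state equals B's averages over the remaining cuts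
theorem pv_combo (threshold : Int) (l : List Int) (xs : List Int) : ∀ (s : Nat) (m cur : List Int) (p : Int),
    l.drop s = cur ++ xs → cur.getLast? = some p →
    (let st := xs.foldl (pvStepA threshold) (m, cur); st.1 ++ [pvAvg st.2])
      = m ++ pvSegAvg l ((s : Int) :: (pvBrk threshold ((s : Int) + (cur.length : Int)) p xs ++ [(l.length : Int)])) := by
  induction xs with
  | nil =>
    intro s m cur p hdrop hlast
    have hs : s ≤ l.length := by
      by_contra h
      rw [List.drop_eq_nil_of_le (by omega)] at hdrop
      obtain ⟨vs, rfl⟩ := List.getLast?_eq_some_iff.mp hlast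
      simp at hdrop
    have hlen : l.length - s = cur.length := by
      have := congrArg List.length hdrop
      simpa using this
    have hslice : PySem.List.slice l (some (s : Int)) (some (l.length : Int)) = cur := by
      rw [show ((l.length : Int)) = ((l.length : Nat) : Int) from rfl, PySem.List.slice_natCast]
      rw [hdrop]
      simp only [List.append_nil]
      exact List.take_of_length_le (by omega)
    simp only [List.foldl_nil, pvBrk, List.nil_append]
    simp [pvSegAvg, hslice]
  | cons y ys ih =>
    intro s m cur p hdrop hlast
    obtain ⟨vs, rfl⟩ := List.getLast?_eq_some_iff.mp hlast
    have hlastget : PySem.List.pyGetD (vs ++ [p]) (-1) 0 = p :=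
      PySem.List.pyGetD_neg_one_append_singleton vs p 0
    simp only [List.foldl_cons]
    by_cases h : y - p ≤ threshold
    · -- no cut here: the current group grows
      have hA : pvStepA threshold (m, vs ++ [p]) y = (m, (vs ++ [p]) ++ [y]) := by
        simp [pvStepA, hlastget, h]
      rw [hA, pvBrk, if_neg (by omega)]
      have harg : ((s : Int) + ((((vs ++ [p]) ++ [y]).length : Nat) : Int))
          = (s : Int) + (((vs ++ [p]).length : Nat) : Int) + 1 := by
        simp
        ring
      rw [ih s m ((vs ++ [p]) ++ [y]) y (by rw [hdrop]; simp) (by simp), harg]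
    · -- cut at position s + |cur|: flush the group, start a new one at y
      have hA : pvStepA threshold (m, vs ++ [p]) y = (m ++ [pvAvg (vs ++ [p])], [y]) := by
        simp [pvStepA, hlastget, h]
      rw [hA, pvBrk, if_pos (by omega)]
      have hdrop' : l.drop (s + (vs ++ [p]).length) = [y] ++ ys := by
        rw [← List.drop_drop, hdrop]
        simp
      have hIH := ih (s + (vs ++ [p]).length) (m ++ [pvAvg (vs ++ [p])]) [y] y hdrop' (by simp)
      have hcast : (s : Int) + (((vs ++ [p]).length : Nat) : Int)
          = (((s + (vs ++ [p]).length) : Nat) : Int) := by push_cast; ring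
      have harg : (((s + (vs ++ [p]).length : Nat)) : Int) + ((([y] : List Int).length : Nat) : Int)
          = (((s + (vs ++ [p]).length) : Nat) : Int) + 1 := by simp
      rw [harg] at hIH
      rw [hIH, hcast, List.cons_append, pvSegAvg_cons]
      have hsliceCur : PySem.List.slice l (some (s : Int)) (some (((s + (vs ++ [p]).length) : Nat) : Int))
          = vs ++ [p] := by
        rw [PySem.List.slice_natCast, hdrop]
        simp only [List.append_assoc, List.singleton_append, Nat.add_sub_cancel_left, List.length_append, List.length_cons, List.length_nil]
        rw [show vs ++ p :: y :: ys = (vs ++ [p]) ++ y :: ys by simp,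
            List.take_append_of_le_length (by simp)]
        exact List.take_of_length_le (by simp)
      rw [hsliceCur]
      simp

-- characterization of A: the indexed loop is a fold of pvStepA over the tail
theorem pvA_char (x : Int) (xs : List Int) (threshold : Int) :
    merge_indices (x :: xs) threshold =
      (let st := xs.foldl (pvStepA threshold) ([], [x]); st.1 ++ [pvAvg st.2]) := by
  unfold merge_indices
  simp only [if_neg (List.cons_ne_nil x xs)]
  have hfold :
      (PySem.List.pyRange 1 (((x :: xs).length : Nat) : Int) 1).foldl
        (fun (st : List Int × List Int) i =>
          if PySem.List.pyGetD (x :: xs) i 0 - PySem.List.pyGetD st.2 (-1) 0 ≤ threshold then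
            (st.1, st.2 ++ [PySem.List.pyGetD (x :: xs) i 0])
          else (st.1 ++ [PySem.Int.floordiv st.2.sum (st.2.length : Int)],
                [PySem.List.pyGetD (x :: xs) i 0]))
        ([], [x])
      = ((x :: xs).drop 1).foldl (pvStepA threshold) ([], [x]) :=
    PySem.List.foldl_pyRange_pyGetD' (x :: xs) 0 (pvStepA threshold) ([], [x]) (a := 1) (by omega)
  simp only [PySem.List.pyGetD_zero_cons]
  rw [hfold]
  simp [pvAvg]

-- characterization of B: cuts are 0, the break positions, and the length
theorem pvB_char (x : Int) (xs : List Int) (threshold : Int) :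
    merge_indices_alt (x :: xs) threshold =
      pvSegAvg (x :: xs) (0 :: (pvBrk threshold 1 x xs ++ [(((x :: xs).length : Nat) : Int)])) := by
  unfold merge_indices_alt
  simp only [if_neg (List.cons_ne_nil x xs)]
  rw [PySem.List.slice_from_one, List.tail_cons, pvBrk_eq_enumFilter threshold xs x 1,
      PySem.List.slice_from_one]
  rfl

-- ===== VERDICT (by name: the statement is the Claim_ definition above) =====
theorem merge_indices_spec : Claim_equal_merge_indices := by
  intro indices threshold _
  unfold Spec_merge_indices
  cases indices with
  | nil => simp [merge_indices, merge_indices_alt]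
  | cons x xs =>
    rw [pvA_char, pvB_char]
    have := pv_combo threshold (x :: xs) xs 0 [] [x] x (by simp) (by simp)
    simpa using this
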